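-- pv_equiv track=rewrite | github.com/pypi-data/pypi-mirror-354 | packages/hashkit/hashkit-1.0.0-py3-none-any.whl/hashkit/cracker.py | _generate_mask_candidates
-- ===== SOURCE A (Python) =====
-- from typing import Optional, List, Dict, Iterator, Callable, Generator
--
-- def _generate_mask_candidates(mask: str, charset_map: Dict[str, str]) -> Generator[str, None, None]:
--     """Generate candidates based on mask pattern"""
--     # Parse mask into positions
--     positions = []
--     i = 0
--     while i < len(mask):
--         if i < len(mask) - 1 and mask[i:i+2] in charset_map:
--             positions.append(charset_map[mask[i:i+2]])
--             i += 2
--         else: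
--             positions.append(mask[i])  # Literal character
--             i += 1
--
--     # Generate all combinations
--     def generate_recursive(pos: int, current: str):
--         if pos >= len(positions):
--             yield current
--         else:
--             charset = positions[pos]
--             if len(charset) == 1:  # Literal character
--                 yield from generate_recursive(pos + 1, current + charset)
--             else:  # Character set
--                 for char in charset:
--                     yield from generate_recursive(pos + 1, current + char)
--
--     yield from generate_recursive(0, "")
-- ===== SOURCE B (Python) =====
-- def _generate_mask_candidates(mask, charset_map):
--     """Generate candidates based on mask pattern"""
--     # Parse the mask recursively on its suffix (no index arithmetic)
--     def parse(rest):
--         if not rest: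
--             return []
--         if len(rest) >= 2 and rest[:2] in charset_map:
--             return [charset_map[rest[:2]]] + parse(rest[2:])
--         return [rest[0]] + parse(rest[1:])
--
--     # Expand the product iteratively, one position at a time
--     acc = [""]
--     for cs in parse(mask):
--         acc = [p + c for p in acc for c in cs]
--     yield from acc
-- ===== Notes on version B (the rewrite author's own statement) =====
-- stated objective: simpler
-- what changed: Mask parsing becomes structural recursion on the suffix instead of an index-based while loop, and the recursive yield-generator is replaced by an iterative accumulator product (acc = [p+c for p in acc for c in cs]).
import Mathlib
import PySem

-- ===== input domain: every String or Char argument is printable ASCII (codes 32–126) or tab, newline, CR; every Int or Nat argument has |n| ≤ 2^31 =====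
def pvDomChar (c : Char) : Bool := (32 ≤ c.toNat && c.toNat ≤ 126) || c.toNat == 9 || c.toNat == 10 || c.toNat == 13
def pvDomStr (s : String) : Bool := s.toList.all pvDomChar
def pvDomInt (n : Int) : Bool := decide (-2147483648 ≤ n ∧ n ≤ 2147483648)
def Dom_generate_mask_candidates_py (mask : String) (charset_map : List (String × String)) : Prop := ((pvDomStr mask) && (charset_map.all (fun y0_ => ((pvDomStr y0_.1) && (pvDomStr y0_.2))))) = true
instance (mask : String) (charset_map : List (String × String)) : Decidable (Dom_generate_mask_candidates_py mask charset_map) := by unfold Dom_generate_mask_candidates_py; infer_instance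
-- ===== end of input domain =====

-- B replaces A's index-based parsing loop with structural recursion on the mask's suffix and
-- the recursive yield-generator with an iterative accumulator product (objective: simpler).
-- Strings are modelled as their character lists (PySem convention), joined with String.ofList at the end.

-- dict lookup (first match in the association list), shared Python-dict semantics
def pvLookup (cm : List (String × String)) (k : List Char) : Option (List Char) :=
  (cm.find? (fun p => p.1.toList == k)).map (fun p => p.2.toList)

-- ===== PORT A =====
-- the while-loop over index i; mask[i:i+2] = (mask.drop i).take 2
def aParse (cm : List (String × String)) (mask : List Char) (i : Nat) : List (List Char) :=
  if _h : i < mask.length then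
    if i < mask.length - 1 ∧ (pvLookup cm ((mask.drop i).take 2)).isSome then
      ((pvLookup cm ((mask.drop i).take 2)).getD []) :: aParse cm mask (i + 2)
    else
      (mask.drop i).take 1 :: aParse cm mask (i + 1)
  else []
termination_by mask.length - i

-- generate_recursive(pos, current)
def aGen (positions : List (List Char)) (pos : Nat) (current : List Char) : List (List Char) :=
  if _h : pos < positions.length then
    let charset := (positions.drop pos).headI
    if charset.length = 1 then
      aGen positions (pos + 1) (current ++ charset)
    else
      charset.flatMap (fun c => aGen positions (pos + 1) (current ++ [c]))
  else [current]
termination_by positions.length - pos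

def generate_mask_candidates_py (mask : String) (charset_map : List (String × String)) : List String :=
  (aGen (aParse charset_map mask.toList 0) 0 []).map String.ofList

-- ===== PORT B =====
-- parse(rest): structural recursion on the suffix
def bParse (cm : List (String × String)) : List Char → List (List Char)
  | [] => []
  | c1 :: c2 :: rest =>
      match pvLookup cm [c1, c2] with
      | some cs => cs :: bParse cm rest
      | none => [c1] :: bParse cm (c2 :: rest)
  | [c1] => [[c1]]

def generate_mask_candidates_py_alt (mask : String) (charset_map : List (String × String)) : List String :=
  ((bParse charset_map mask.toList).foldl
      (fun acc cs => acc.flatMap (fun p => cs.map (fun c => p ++ [c]))) [[]]).map String.ofList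

-- ===== PRECONDITION & SPEC =====
def Spec_generate_mask_candidates_py (mask : String) (charset_map : List (String × String)) (out : List String) : Prop := out = generate_mask_candidates_py_alt mask charset_map
instance (mask : String) (charset_map : List (String × String)) (out : List String) : Decidable (Spec_generate_mask_candidates_py mask charset_map out) := by unfold Spec_generate_mask_candidates_py; infer_instance

-- ===== CLAIM (what is proved, stated in full; the proofs are below) =====
def Claim_equal_generate_mask_candidates_py : Prop := ∀ (mask : String) (charset_map : List (String × String)), Dom_generate_mask_candidates_py mask charset_map → Spec_generate_mask_candidates_py mask charset_map (generate_mask_candidates_py mask charset_map)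

-- ===== LEMMAS AND PROOFS =====

-- the two parsers agree: aParse from index i is bParse on the suffix
theorem aParse_eq_bParse (cm : List (String × String)) (mask : List Char) (i : Nat) :
    aParse cm mask i = bParse cm (mask.drop i) := by
  fun_induction aParse cm mask i with
  | case1 i h hc ih =>
      obtain ⟨hlt, hsome⟩ := hc
      rw [ih]
      obtain ⟨c1, c2, rest, hd⟩ : ∃ c1 c2 rest, mask.drop i = c1 :: c2 :: rest := by
        have h2 : 2 ≤ (mask.drop i).length := by simp [List.length_drop]; omega
        match hm : mask.drop i with
        | c1 :: c2 :: rest => exact ⟨c1, c2, rest, rfl⟩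
        | [] | [c1] => simp [hm] at h2
      have hd2 : mask.drop (i + 2) = rest := by
        have := congrArg (List.drop 2) hd
        simpa [List.drop_drop, Nat.add_comm] using this
      rw [hd2, hd]
      rw [hd] at hsome
      simp only [List.take_succ_cons, List.take_zero, bParse] at hsome ⊢
      obtain ⟨v, hv⟩ := Option.isSome_iff_exists.mp hsome
      simp [hv]
  | case2 i h hc ih =>
      rw [ih]
      obtain ⟨c1, rest, hd⟩ : ∃ c1 rest, mask.drop i = c1 :: rest := by
        have h1 : 1 ≤ (mask.drop i).length := by simp [List.length_drop]; omega
        match hm : mask.drop i with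
        | c1 :: rest => exact ⟨c1, rest, rfl⟩
        | [] => simp [hm] at h1
      have hd1 : mask.drop (i + 1) = rest := by
        have := congrArg (List.drop 1) hd
        simpa [List.drop_drop, Nat.add_comm] using this
      rw [hd1, hd]
      match rest with
      | [] => simp [bParse]
      | c2 :: rest' =>
          have hnone : pvLookup cm [c1, c2] = none := by
            by_contra hne
            apply hc
            constructor
            · have := congrArg List.length hd
              simp [List.length_drop] at this
              omega
            · rw [hd]
              simp only [List.take_succ_cons, List.take_zero]
              exact Option.isSome_iff_ne_none.mpr hne
          simp [bParse, hnone]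
  | case3 i h =>
      have : mask.drop i = [] := List.drop_eq_nil_of_le (by omega)
      simp [this, bParse]

-- the recursive generator, restated structurally on the suffix of positions
def genL : List (List Char) → List Char → List (List Char)
  | [], cur => [cur]
  | cs :: rest, cur => cs.flatMap (fun c => genL rest (cur ++ [c]))

theorem aGen_eq_genL (positions : List (List Char)) (pos : Nat) (cur : List Char) :
    aGen positions pos cur = genL (positions.drop pos) cur := by
  fun_induction aGen positions pos cur with
  | case1 pos cur h charset h1 ih =>
      obtain ⟨rest, hd⟩ : ∃ rest, positions.drop pos = charset :: rest := by
        match hm : positions.drop pos with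
        | c :: rest =>
            refine ⟨rest, ?_⟩
            have : charset = c := by simp [charset, hm]
            rw [this]
        | [] =>
            have := congrArg List.length hm
            simp [List.length_drop] at this
            omega
      have hd1 : positions.drop (pos + 1) = rest := by
        have := congrArg (List.drop 1) hd
        simpa [List.drop_drop, Nat.add_comm] using this
      obtain ⟨c, hc⟩ := List.length_eq_one_iff.mp h1
      rw [ih, hd1, hd]
      simp [genL, hc]
  | case2 pos cur h charset h1 ih =>
      obtain ⟨rest, hd⟩ : ∃ rest, positions.drop pos = charset :: rest := by
        match hm : positions.drop pos with
        | c :: rest =>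
            refine ⟨rest, ?_⟩
            have : charset = c := by simp [charset, hm]
            rw [this]
        | [] =>
            have := congrArg List.length hm
            simp [List.length_drop] at this
            omega
      have hd1 : positions.drop (pos + 1) = rest := by
        have := congrArg (List.drop 1) hd
        simpa [List.drop_drop, Nat.add_comm] using this
      rw [hd]
      simp only [genL]
      simp only [ih, hd1]
  | case3 pos cur h =>
      have : positions.drop pos = [] := List.drop_eq_nil_of_le (by omega)
      simp [this, genL]

theorem foldl_prod_eq_genL (ps : List (List Char)) (acc : List (List Char)) :
    ps.foldl (fun acc cs => acc.flatMap (fun p => cs.map (fun c => p ++ [c]))) acc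
      = acc.flatMap (fun p => genL ps p) := by
  induction ps generalizing acc with
  | nil => simp [genL]
  | cons cs rest ih =>
      simp only [List.foldl_cons, ih, genL, List.flatMap_assoc, List.flatMap_map]

-- ===== VERDICT (by name: the statement is the Claim_ definition above) =====
theorem generate_mask_candidates_py_spec : Claim_equal_generate_mask_candidates_py := by
  intro mask cm _
  unfold Spec_generate_mask_candidates_py generate_mask_candidates_py generate_mask_candidates_py_alt
  rw [aParse_eq_bParse, List.drop_zero, aGen_eq_genL, List.drop_zero, foldl_prod_eq_genL]
  simp
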